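-- pv_equiv track=rewrite | github.com/spiderSalad/vtmjam_SofaBaron | game_events.py | compile_single_blurb
-- ===== SOURCE A (Python) =====
-- def compile_single_blurb(lines, index):
--     blurb_text, end_i = "", index
--     for i in range(index, len(lines) - 1):
--         line = lines[i]
--         if line == "\n" or not line:
--             end_i = i
--             break
--         blurb_text += line + "\n"
--     return blurb_text, end_i
-- ===== SOURCE B (Python) =====
-- def compile_single_blurb(lines, index):
--     # Two-pass: find the boundary first, then build the text from the index range.
--     stop, end_i = len(lines) - 1, index
--     for i in range(index, len(lines) - 1):
--         line = lines[i]
--         if line == "\n" or not line: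
--             stop = end_i = i
--             break
--     blurb_text = "".join(lines[i] + "\n" for i in range(index, stop))
--     return blurb_text, end_i
-- ===== Notes on version B (the rewrite author's own statement) =====
-- stated objective: alternative
-- what changed: A's single accumulate-and-break loop is replaced by a boundary scan that records the stop and end indices, followed by a separate join over the index range to build the text.
import Mathlib
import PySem

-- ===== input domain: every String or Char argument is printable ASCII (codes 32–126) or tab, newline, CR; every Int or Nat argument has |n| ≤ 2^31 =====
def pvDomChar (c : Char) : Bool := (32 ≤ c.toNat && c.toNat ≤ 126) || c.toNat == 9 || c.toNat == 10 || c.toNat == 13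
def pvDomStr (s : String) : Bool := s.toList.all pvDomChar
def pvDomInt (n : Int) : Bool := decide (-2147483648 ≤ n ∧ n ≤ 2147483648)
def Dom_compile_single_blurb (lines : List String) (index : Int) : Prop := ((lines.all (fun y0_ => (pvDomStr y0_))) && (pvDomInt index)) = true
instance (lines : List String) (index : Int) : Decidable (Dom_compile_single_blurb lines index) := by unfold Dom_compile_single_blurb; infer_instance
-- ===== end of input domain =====

-- B replaces A's single accumulate-and-break loop by a boundary scan followed by a
-- join over the index range (objective: alternative decomposition, same cost).

-- ===== PORT A =====
-- A's for-loop with break: structural recursion over the range list, carrying (blurb_text, end_i).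
def pvALoop (lines : List String) : List Int → String → Int → String × Int
  | [], acc, e => (acc, e)
  | i :: rest, acc, e =>
    let line := (PySem.List.pyGet? lines i).getD ""   -- Pre_ excludes the IndexError case
    if line = "\n" ∨ line = "" then (acc, i)
    else pvALoop lines rest (acc ++ line ++ "\n") e

def compile_single_blurb (lines : List String) (index : Int) : String × Int :=
  pvALoop lines (PySem.List.pyRange index ((lines.length : Int) - 1) 1) "" index

-- ===== PORT B =====
-- B's first pass: scan for the boundary, carrying (stop, end_i); break = return at first blank.
def pvBFind (lines : List String) : List Int → Int → Int → Int × Int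
  | [], s, e => (s, e)
  | i :: rest, s, e =>
    let line := (PySem.List.pyGet? lines i).getD ""
    if line = "\n" ∨ line = "" then (i, i)
    else pvBFind lines rest s e

def compile_single_blurb_alt (lines : List String) (index : Int) : String × Int :=
  let n : Int := lines.length
  let se := pvBFind lines (PySem.List.pyRange index (n - 1) 1) (n - 1) index
  let blurb_text :=
    String.join ((PySem.List.pyRange index se.1 1).map
      (fun i => (PySem.List.pyGet? lines i).getD "" ++ "\n"))
  (blurb_text, se.2)

-- ===== PRECONDITION & SPEC =====
-- Pre_ excludes exactly the inputs where Python A raises IndexError: a non-empty loop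
-- range whose first index is below -len(lines). B raises identically there.
def Pre_compile_single_blurb (lines : List String) (index : Int) : Prop :=
  (lines.length : Int) - 1 ≤ index ∨ -(lines.length : Int) ≤ index
instance (lines : List String) (index : Int) : Decidable (Pre_compile_single_blurb lines index) := by unfold Pre_compile_single_blurb; infer_instance

def pvWitness_compile_single_blurb : List String × Int := (["a", "b", "", "c"], 0)

def Spec_compile_single_blurb (lines : List String) (index : Int) (out : String × Int) : Prop := out = compile_single_blurb_alt lines index
instance (lines : List String) (index : Int) (out : String × Int) : Decidable (Spec_compile_single_blurb lines index out) := by unfold Spec_compile_single_blurb; infer_instance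

-- ===== CLAIM (what is proved, stated in full; the proofs are below) =====
def Claim_equal_compile_single_blurb : Prop := ∀ (lines : List String) (index : Int), Dom_compile_single_blurb lines index → Pre_compile_single_blurb lines index → Spec_compile_single_blurb lines index (compile_single_blurb lines index)

-- ===== LEMMAS AND PROOFS =====

-- folding ++ distributes over the initial accumulator
lemma pvFoldl_append (l : List String) : ∀ (s t : String), List.foldl (· ++ ·) (s ++ t) l = s ++ List.foldl (· ++ ·) t l := by
  induction l with
  | nil => intro s t; simp [List.foldl]
  | cons x xs ih => intro s t; simp only [List.foldl, String.append_assoc]; exact ih s (t ++ x)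

lemma pvJoin_cons (s : String) (l : List String) : String.join (s :: l) = s ++ String.join l := by
  have h := pvFoldl_append l s ""
  simp only [String.join, List.foldl]
  simpa using h

-- the stop index found by B's scan never drops below a lower bound of the range and the default
lemma pvBFind_fst_ge (lines : List String) (a : Int) : ∀ (is : List Int) (s e : Int),
    (∀ i ∈ is, a ≤ i) → a ≤ s → a ≤ (pvBFind lines is s e).1 := by
  intro is
  induction is with
  | nil => intro s e _ hs; simpa [pvBFind] using hs
  | cons i rest ih =>
    intro s e hmem hs
    simp only [pvBFind]
    split_ifs with h
    · exact hmem i (by simp)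
    · exact ih s e (fun j hj => hmem j (by simp [hj])) hs

-- A's loop equals: join over the range up to B's stop, paired with B's end index
lemma pvLoop_eq (lines : List String) : ∀ (a b : Int) (acc : String) (e : Int),
    pvALoop lines (PySem.List.pyRange a b 1) acc e =
      (acc ++ String.join ((PySem.List.pyRange a (pvBFind lines (PySem.List.pyRange a b 1) b e).1 1).map
          (fun i => (PySem.List.pyGet? lines i).getD "" ++ "\n")),
       (pvBFind lines (PySem.List.pyRange a b 1) b e).2) := by
  intro a b acc e
  by_cases hab : a < b
  · rw [PySem.List.pyRange_one_cons hab]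
    simp only [pvALoop, pvBFind]
    split_ifs with h
    · rw [PySem.List.pyRange_one_eq_nil (by omega)]
      simp [String.join]
    · have hrec := pvLoop_eq lines (a + 1) b (acc ++ (PySem.List.pyGet? lines a).getD "" ++ "\n") e
      rw [hrec]
      have hge : a + 1 ≤ (pvBFind lines (PySem.List.pyRange (a+1) b 1) b e).1 :=
        pvBFind_fst_ge lines (a + 1) (PySem.List.pyRange (a+1) b 1) b e
          (fun j hj => ((PySem.List.mem_pyRange_one).1 hj).1) (by omega)
      rw [PySem.List.pyRange_one_cons (show a < (pvBFind lines (PySem.List.pyRange (a+1) b 1) b e).1 by omega)]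
      rw [List.map_cons, pvJoin_cons]
      simp [String.append_assoc]
  · rw [PySem.List.pyRange_one_eq_nil (by omega)]
    simp [pvALoop, pvBFind, String.join, PySem.List.pyRange_one_eq_nil (show b ≤ a by omega)]
termination_by a b => (b - a).toNat
decreasing_by omega

-- ===== VERDICT (by name: the statement is the Claim_ definition above) =====
theorem compile_single_blurb_spec : Claim_equal_compile_single_blurb := by
  intro lines index _ _
  unfold Spec_compile_single_blurb compile_single_blurb compile_single_blurb_alt
  have h := pvLoop_eq lines index ((lines.length : Int) - 1) "" index
  simp only [h]
  simp
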